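-- pv_equiv track=rewrite | github.com/TheAidanAu/Leetcode_GitHub | Python DSA Course by freeCodeCamp/OA Max Temperature Change Prefix Sum PostFix Sum.py | max_aggregate_temperature_change
-- ===== SOURCE A (Python) =====
-- def max_aggregate_temperature_change(arr):
--     n = len(arr)
--
--     # Calculate Prefix Sum Array
--     prefix_sum = [0] * n
--     prefix_sum[0] = arr[0]
--     for i in range(1, n):
--         prefix_sum[i] = prefix_sum[i - 1] + arr[i]
--
--     # Calculate Postfix Sum Array
--     postfix_sum = [0] * n
--     postfix_sum[n - 1] = arr[n - 1]
--     for i in range(n - 2, -1, -1):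
--         postfix_sum[i] = postfix_sum[i + 1] + arr[i]
--
--     max_temperature_change = float('-inf')
--     for i in range(n):
--         max_temperature_change = max(max_temperature_change, max(prefix_sum[i], postfix_sum[i]))
--
--     return max_temperature_change
-- ===== SOURCE B (Python) =====
-- def max_aggregate_temperature_change(arr):
--     # suffix_sum(i) == total - prefix_sum_before(i), so only prefix sums are needed:
--     # answer = max(max prefix sums, total - min of the prefixes that precede each suffix).
--     prefs = [0]
--     for x in arr:
--         prefs.append(prefs[-1] + x)
--     total = prefs[-1]
--     return max(max(prefs[1:]), total - min(prefs[:-1]))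
-- ===== Notes on version B (the rewrite author's own statement) =====
-- stated objective: simpler
-- what changed: Eliminates the suffix-sum array and the backward pass entirely via the identity suffix_sum(i) = total - prefix_sum(0..i-1): B builds one list of prefix sums and returns max(max(prefs[1:]), total - min(prefs[:-1])).
import Mathlib
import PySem

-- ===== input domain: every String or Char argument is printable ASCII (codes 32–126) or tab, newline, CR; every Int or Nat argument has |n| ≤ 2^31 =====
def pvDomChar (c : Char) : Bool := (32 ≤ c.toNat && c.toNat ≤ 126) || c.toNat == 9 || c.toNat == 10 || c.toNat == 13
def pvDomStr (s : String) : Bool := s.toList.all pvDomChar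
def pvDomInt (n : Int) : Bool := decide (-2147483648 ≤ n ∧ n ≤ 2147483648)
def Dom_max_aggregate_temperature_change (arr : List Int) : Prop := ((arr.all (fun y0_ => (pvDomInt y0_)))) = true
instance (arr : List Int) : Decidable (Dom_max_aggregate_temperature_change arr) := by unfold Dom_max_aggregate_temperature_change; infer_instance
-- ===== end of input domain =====

-- B drops the suffix-sum array and the backward pass entirely, using the identity
-- suffix_sum(i) = total - prefix_sum(0..i-1) on a single list of prefix sums (objective: simpler).

-- ===== PORT A =====
def max_aggregate_temperature_change (arr : List Int) : Int :=
  let n : Int := arr.length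
  let prefix0 := PySem.List.pyRepeat [(0 : Int)] n
  let prefix1 := PySem.List.pySetD prefix0 0 (PySem.List.pyGetD arr 0 0)
  let prefixF := (PySem.List.pyRange 1 n 1).foldl
      (fun ps i => PySem.List.pySetD ps i (PySem.List.pyGetD ps (i - 1) 0 + PySem.List.pyGetD arr i 0)) prefix1
  let post0 := PySem.List.pyRepeat [(0 : Int)] n
  let post1 := PySem.List.pySetD post0 (n - 1) (PySem.List.pyGetD arr (n - 1) 0)
  let postF := (PySem.List.pyRange (n - 2) (-1) (-1)).foldl
      (fun ps i => PySem.List.pySetD ps i (PySem.List.pyGetD ps (i + 1) 0 + PySem.List.pyGetD arr i 0)) post1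
  -- max_temperature_change starts at float('-inf'): modelled as `none`; for n ≥ 1 the first
  -- iteration replaces it, so the Int result is Python's exact return value on every input in Pre_.
  let res := (PySem.List.pyRange 0 n 1).foldl
      (fun (acc : Option Int) i =>
        some (match acc with
              | none => max (PySem.List.pyGetD prefixF i 0) (PySem.List.pyGetD postF i 0)
              | some m => max m (max (PySem.List.pyGetD prefixF i 0) (PySem.List.pyGetD postF i 0)))) none
  res.getD 0

-- ===== PORT B =====
def max_aggregate_temperature_change_alt (arr : List Int) : Int :=
  let prefs := arr.foldl (fun ps x => ps ++ [PySem.List.pyGetD ps (-1) 0 + x]) [(0 : Int)]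
  let total := PySem.List.pyGetD prefs (-1) 0
  -- max()/min() of a nonempty list of ints; on the empty slice Python raises (outside Pre_),
  -- modelled by the Option default.
  let mx := (PySem.List.max? (PySem.List.slice prefs (some 1) none) (fun y => y)).getD 0
  let mn := (PySem.List.min? (PySem.List.slice prefs none (some (-1))) (fun y => y)).getD 0
  max mx (total - mn)

-- ===== PRECONDITION & SPEC =====
-- Python A raises IndexError on the empty list (prefix_sum[0] = arr[0]); B raises there too (max of empty slice).
def Pre_max_aggregate_temperature_change (arr : List Int) : Prop := arr ≠ []
instance (arr : List Int) : Decidable (Pre_max_aggregate_temperature_change arr) := by unfold Pre_max_aggregate_temperature_change; infer_instance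
def pvWitness_max_aggregate_temperature_change : List Int := [3, -1, 2]

def Spec_max_aggregate_temperature_change (arr : List Int) (out : Int) : Prop := out = max_aggregate_temperature_change_alt arr
instance (arr : List Int) (out : Int) : Decidable (Spec_max_aggregate_temperature_change arr out) := by unfold Spec_max_aggregate_temperature_change; infer_instance

-- ===== CLAIM (what is proved, stated in full; the proofs are below) =====
def Claim_equal_max_aggregate_temperature_change : Prop := ∀ (arr : List Int), Dom_max_aggregate_temperature_change arr → Pre_max_aggregate_temperature_change arr → Spec_max_aggregate_temperature_change arr (max_aggregate_temperature_change arr)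

-- ===== LEMMAS AND PROOFS =====

def pvCum (s : Int) : List Int → List Int
  | [] => []
  | x :: xs => (s + x) :: pvCum (s + x) xs

def pvSuf : List Int → List Int
  | [] => []
  | x :: xs => (x + (pvSuf xs).headD 0) :: pvSuf xs

theorem pvCum_length (xs : List Int) : ∀ s, (pvCum s xs).length = xs.length := by
  induction xs with
  | nil => intro s; rfl
  | cons x xs ih => intro s; simp [pvCum, ih]

theorem pvCum_getD (xs : List Int) : ∀ (s : Int) (k : Nat), k < xs.length →
    (pvCum s xs).getD k 0 = s + (xs.take (k+1)).sum := by
  induction xs with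
  | nil => intro s k h; simp at h
  | cons x xs ih =>
    intro s k h
    cases k with
    | zero => simp [pvCum]
    | succ k =>
      simp only [pvCum, List.getD_cons_succ, List.take_succ_cons, List.sum_cons]
      rw [ih (s + x) k (by simpa using h)]
      ring

theorem pvSuf_length (xs : List Int) : (pvSuf xs).length = xs.length := by
  induction xs with
  | nil => rfl
  | cons x xs ih => simp [pvSuf, ih]

theorem pvSuf_getD (xs : List Int) : ∀ k, (pvSuf xs).getD k 0 = (xs.drop k).sum := by
  induction xs with
  | nil => intro k; simp [pvSuf]
  | cons x xs ih =>
    intro k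
    cases k with
    | zero =>
      have h0 := ih 0
      simp only [pvSuf, List.getD_cons_zero, List.drop_zero, List.sum_cons]
      have : (pvSuf xs).headD 0 = (pvSuf xs).getD 0 0 := by
        cases pvSuf xs <;> simp
      rw [this, h0]; simp
    | succ k => simpa [pvSuf] using ih k

theorem pvFoldlZipMax (ps : List Int) : ∀ (ss : List Int) (a b : Int), ps.length = ss.length →
    (ps.zip ss).foldl (fun m pr => max m (max pr.1 pr.2)) (max a b)
      = max (ps.foldl max a) (ss.foldl max b) := by
  induction ps with
  | nil =>
    intro ss a b h
    have : ss = [] := by simpa using h.symm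
    simp [this]
  | cons p ps ih =>
    intro ss a b h
    cases ss with
    | nil => simp at h
    | cons s ss =>
      simp only [List.zip_cons_cons, List.foldl_cons]
      rw [max_max_max_comm a b p s, ih ss (max a p) (max b s) (by simpa using h)]

theorem pvDropLastOne (l : List Int) : ∀ (k : Nat), l.length = k + 1 → l.drop k = [l.getD k 0] := by
  induction l with
  | nil => intro k h; simp at h
  | cons x l ih =>
    intro k h
    cases k with
    | zero =>
      have : l = [] := by simpa using h
      simp [this]
    | succ k => simpa using ih k (by simpa using h)

theorem pvSetReplicate (j : Nat) (v : Int) :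
    (List.replicate (j + 1) (0 : Int)).set j v = List.replicate j 0 ++ [v] := by
  induction j with
  | zero => rfl
  | succ j ih => simpa [List.replicate_succ] using ih

theorem pvCumRec (arr : List Int) (j : Nat) (h1 : 1 ≤ j) (h2 : j < arr.length) :
    (pvCum 0 arr).getD j 0 = (pvCum 0 arr).getD (j - 1) 0 + arr.getD j 0 := by
  rw [pvCum_getD arr 0 j h2, pvCum_getD arr 0 (j - 1) (by omega)]
  have hj : j - 1 + 1 = j := by omega
  rw [hj]
  have ht : arr.take (j + 1) = arr.take j ++ [arr[j]] := by
    rw [List.take_add_one, List.getElem?_eq_getElem h2]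
    rfl
  rw [ht, List.sum_append, List.getD_eq_getElem arr 0 h2]
  simp

theorem pvPrefInv (arr : List Int) : ∀ (m j : Nat), arr.length - j = m → 1 ≤ j → j ≤ arr.length →
    (PySem.List.pyRange (j : Int) ((arr.length : Int)) 1).foldl
      (fun ps i => PySem.List.pySetD ps i (PySem.List.pyGetD ps (i - 1) 0 + PySem.List.pyGetD arr i 0))
      ((pvCum 0 arr).take j ++ List.replicate (arr.length - j) 0)
    = pvCum 0 arr := by
  intro m
  induction m with
  | zero =>
    intro j hm h1 h2
    have hj : j = arr.length := by omega
    subst hj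
    rw [PySem.List.pyRange_one_eq_nil (le_refl _)]
    simp [List.take_of_length_le, pvCum_length]
  | succ m ih =>
    intro j hm h1 h2
    have hj : j < arr.length := by omega
    rw [PySem.List.pyRange_one_cons (by exact_mod_cast hj)]
    simp only [List.foldl_cons]
    have hc1 : ((j : Int) - 1) = (((j - 1 : Nat)) : Int) := by omega
    have hlenC : (pvCum 0 arr).length = arr.length := pvCum_length arr 0
    have hltake : ((pvCum 0 arr).take j).length = j := by
      rw [List.length_take]; omega
    have hget : PySem.List.pyGetD ((pvCum 0 arr).take j ++ List.replicate (arr.length - j) 0) ((j : Int) - 1) 0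
        = (pvCum 0 arr).getD (j - 1) 0 := by
      rw [hc1, PySem.List.pyGetD_natCast]
      rw [List.getD_append _ _ _ _ (by omega)]
      rw [List.getD_eq_getElem _ _ (by omega), List.getElem_take, ← List.getD_eq_getElem _ _ (by omega)]
    have hstep : PySem.List.pySetD ((pvCum 0 arr).take j ++ List.replicate (arr.length - j) 0) (j : Int)
          ((pvCum 0 arr).getD (j - 1) 0 + PySem.List.pyGetD arr (j : Int) 0)
        = (pvCum 0 arr).take (j + 1) ++ List.replicate (arr.length - (j + 1)) 0 := by
      rw [PySem.List.pySetD_natCast, PySem.List.pyGetD_natCast]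
      rw [← pvCumRec arr j h1 hj]
      rw [List.set_append]
      rw [if_neg (by omega)]
      have hrep : List.replicate (arr.length - j) (0 : Int) = 0 :: List.replicate (arr.length - (j + 1)) 0 := by
        have : arr.length - j = (arr.length - (j + 1)) + 1 := by omega
        rw [this, List.replicate_succ]
      rw [hltake, hrep]
      have hsz : j - j = 0 := by omega
      rw [hsz, List.set_cons_zero]
      have htk : (pvCum 0 arr).take (j + 1) = (pvCum 0 arr).take j ++ [(pvCum 0 arr).getD j 0] := by
        rw [List.take_add_one, List.getElem?_eq_getElem (by omega), List.getD_eq_getElem _ _ (by omega)]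
        rfl
      rw [htk, List.append_assoc]
      rfl
    rw [hget, hstep]
    have hc2 : ((j : Int) + 1) = (((j + 1 : Nat)) : Int) := by omega
    rw [hc2]
    exact ih (j + 1) (by omega) (by omega) (by omega)

theorem pvPostInv (arr : List Int) : ∀ (j : Nat), j + 1 ≤ arr.length →
    (PySem.List.pyRange ((j : Int) - 1) (-1) (-1)).foldl
      (fun ps i => PySem.List.pySetD ps i (PySem.List.pyGetD ps (i + 1) 0 + PySem.List.pyGetD arr i 0))
      (List.replicate j 0 ++ (pvSuf arr).drop j)
    = pvSuf arr := by
  intro j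
  induction j with
  | zero =>
    intro _
    rw [show ((0 : Nat) : Int) - 1 = -1 by omega]
    rw [PySem.List.pyRange_neg_one_eq_nil (le_refl _)]
    simp
  | succ j ih =>
    intro hle
    have hj : j + 1 < arr.length ∨ j + 1 = arr.length := by omega
    have hjlt : j < arr.length := by omega
    have hlenS : (pvSuf arr).length = arr.length := pvSuf_length arr
    rw [show (((j + 1 : Nat)) : Int) - 1 = (j : Int) by omega]
    rw [PySem.List.pyRange_neg_one_cons (by omega)]
    simp only [List.foldl_cons]
    have hget : PySem.List.pyGetD (List.replicate (j + 1) 0 ++ (pvSuf arr).drop (j + 1)) ((j : Int) + 1) 0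
        = (pvSuf arr).getD (j + 1) 0 := by
      rw [show ((j : Int) + 1) = (((j + 1 : Nat)) : Int) by omega, PySem.List.pyGetD_natCast]
      rw [List.getD_append_right _ _ _ _ (by simp)]
      simp only [List.length_replicate, Nat.sub_self]
      rcases hj with hlt | heq
      · rw [List.getD_eq_getElem _ _ (by simp; omega), List.getElem_drop,
            ← List.getD_eq_getElem _ _ (by omega)]
      · rw [List.drop_of_length_le (by omega)]
        rw [List.getD_eq_default _ _ (by simp), List.getD_eq_default _ _ (by omega)]
    have hv : (pvSuf arr).getD (j + 1) 0 + PySem.List.pyGetD arr (j : Int) 0 = (pvSuf arr).getD j 0 := by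
      rw [PySem.List.pyGetD_natCast, pvSuf_getD, pvSuf_getD]
      rw [List.drop_eq_getElem_cons hjlt, List.sum_cons, List.getD_eq_getElem arr 0 hjlt]
      ring
    have hdropj : (pvSuf arr).drop j = (pvSuf arr).getD j 0 :: (pvSuf arr).drop (j + 1) := by
      rw [List.drop_eq_getElem_cons (by omega), List.getD_eq_getElem _ _ (by omega)]
    have hstep : PySem.List.pySetD (List.replicate (j + 1) 0 ++ (pvSuf arr).drop (j + 1)) (j : Int)
          ((pvSuf arr).getD j 0)
        = List.replicate j 0 ++ (pvSuf arr).drop j := by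
      rw [PySem.List.pySetD_natCast, List.set_append, if_pos (by simp), pvSetReplicate]
      rw [hdropj, List.append_assoc]
      rfl
    rw [hget, hv, hstep]
    exact ih (by omega)

theorem pvOptFold (C S : List Int) (l : List Int) : ∀ (acc : Int),
    l.foldl (fun (a : Option Int) i =>
      some (match a with
            | none => max (PySem.List.pyGetD C i 0) (PySem.List.pyGetD S i 0)
            | some m => max m (max (PySem.List.pyGetD C i 0) (PySem.List.pyGetD S i 0)))) (some acc)
    = some (l.foldl (fun m i => max m (max (PySem.List.pyGetD C i 0) (PySem.List.pyGetD S i 0))) acc) := by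
  induction l with
  | nil => intro acc; rfl
  | cons x l ih => intro acc; simp only [List.foldl_cons]; exact ih _

theorem pvIdxZip (C S : List Int) (n : Nat) (hC : C.length = n) (hS : S.length = n) :
    ∀ (m j : Nat), n - j = m → j ≤ n → ∀ (acc : Int),
    (PySem.List.pyRange (j : Int) (n : Int) 1).foldl
      (fun m' i => max m' (max (PySem.List.pyGetD C i 0) (PySem.List.pyGetD S i 0))) acc
    = ((C.zip S).drop j).foldl (fun m' pr => max m' (max pr.1 pr.2)) acc := by
  intro m
  induction m with
  | zero =>
    intro j hm hle acc
    have hj : j = n := by omega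
    subst hj
    rw [PySem.List.pyRange_one_eq_nil (le_refl _)]
    rw [List.drop_of_length_le (by simp [List.length_zip, hC, hS])]
    rfl
  | succ m ih =>
    intro j hm hle acc
    have hj : j < n := by omega
    rw [PySem.List.pyRange_one_cons (by exact_mod_cast hj)]
    simp only [List.foldl_cons, PySem.List.pyGetD_natCast]
    have hdrop : (C.zip S).drop j = (C[j]'(by omega), S[j]'(by omega)) :: (C.zip S).drop (j + 1) := by
      rw [List.drop_eq_getElem_cons (by simp [List.length_zip, hC, hS]; omega)]
      rw [List.getElem_zip]
    rw [hdrop]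
    simp only [List.foldl_cons]
    rw [List.getD_eq_getElem _ _ (by omega), List.getD_eq_getElem _ _ (by omega)]
    rw [show ((j : Int) + 1) = (((j + 1 : Nat)) : Int) by omega]
    exact ih (j + 1) (by omega) (by omega) _

-- B-side lemmas
theorem pvBuild (arr : List Int) : ∀ (pre : List Int) (s : Int),
    arr.foldl (fun ps x => ps ++ [PySem.List.pyGetD ps (-1) 0 + x]) (pre ++ [s])
      = (pre ++ [s]) ++ pvCum s arr := by
  induction arr with
  | nil => intro pre s; simp [pvCum]
  | cons x xs ih =>
    intro pre s
    simp only [List.foldl_cons, PySem.List.pyGetD_neg_one_append_singleton]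
    have h2 : pre ++ [s] ++ [s + x] = (pre ++ [s]) ++ [s + x] := rfl
    rw [h2, ih (pre ++ [s]) (s + x)]
    simp [pvCum]

theorem pvGetLast (xs : List Int) : ∀ (s : Int) (h : (s :: pvCum s xs) ≠ []),
    (s :: pvCum s xs).getLast h = s + xs.sum := by
  induction xs with
  | nil => intro s h; simp [pvCum]
  | cons x t ih =>
    intro s h
    show (s :: (s + x) :: pvCum (s + x) t).getLast (by simp) = s + (x :: t).sum
    rw [List.getLast_cons (by simp)]
    rw [ih (s + x) (by simp)]
    simp [add_assoc]

theorem pvMaxMap (l : List Int) : ∀ (c acc : Int),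
    (l.map (fun p => c - p)).foldl max (c - acc) = c - l.foldl min acc := by
  induction l with
  | nil => intro c acc; rfl
  | cons x t ih =>
    intro c acc
    simp only [List.map_cons, List.foldl_cons]
    rw [show max (c - acc) (c - x) = c - min acc x by
      rcases le_total acc x with h | h
      · rw [min_eq_left h, max_eq_left (by omega)]
      · rw [min_eq_right h, max_eq_right (by omega)]]
    exact ih c (min acc x)

theorem pvSufMap (arr : List Int) (h : arr ≠ []) :
    pvSuf arr = (arr.sum - 0) :: ((pvCum 0 arr).dropLast.map (fun p => arr.sum - p)) := by
  have hn : 1 ≤ arr.length := by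
    cases arr with
    | nil => exact absurd rfl h
    | cons y t => simp
  have hC : (pvCum 0 arr).length = arr.length := pvCum_length arr 0
  have hS : (pvSuf arr).length = arr.length := pvSuf_length arr
  apply List.ext_getElem
  · simp [hS, List.length_dropLast, hC]; omega
  · intro k h1 h2
    cases k with
    | zero =>
      rw [← List.getD_eq_getElem _ 0 (by omega), pvSuf_getD]
      simp
    | succ k =>
      have hk : k < arr.length - 1 := by
        simp [List.length_dropLast, hC] at h2; omega
      rw [← List.getD_eq_getElem _ 0 (by omega), pvSuf_getD]
      simp only [List.getElem_cons_succ]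
      rw [List.getElem_map, List.getElem_dropLast,
          ← List.getD_eq_getElem _ 0 (by omega), pvCum_getD arr 0 k (by omega)]
      have hsplit : (arr.take (k+1)).sum + (arr.drop (k+1)).sum = arr.sum := by
        conv_rhs => rw [← List.take_append_drop (k+1) arr]
        rw [List.sum_append]
      omega

theorem pvMain (a : Int) (rest : List Int) :
    max_aggregate_temperature_change (a :: rest) = max_aggregate_temperature_change_alt (a :: rest) := by
  have hne : (a :: rest) ≠ [] := by simp
  have hlen : (a :: rest).length = rest.length + 1 := by simp
  have hlenC : (pvCum 0 (a :: rest)).length = (a :: rest).length := pvCum_length _ 0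
  have hlenS : (pvSuf (a :: rest)).length = (a :: rest).length := pvSuf_length _
  simp only [max_aggregate_temperature_change, max_aggregate_temperature_change_alt]
  -- A side: the replicated zero arrays
  have hrep : PySem.List.pyRepeat [(0 : Int)] (((a :: rest).length : Nat) : Int) = List.replicate (a :: rest).length 0 := by
    rw [PySem.List.pyRepeat_singleton]; simp
  rw [hrep]
  -- prefix base
  have hbase : PySem.List.pySetD (List.replicate (a :: rest).length (0 : Int)) 0 (PySem.List.pyGetD (a :: rest) 0 0)
      = (pvCum 0 (a :: rest)).take 1 ++ List.replicate ((a :: rest).length - 1) 0 := by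
    rw [PySem.List.pyGetD_zero_cons, PySem.List.pySetD_of_nonneg _ _ (le_refl 0)]
    simp [hlen, List.replicate_succ, pvCum]
  rw [hbase]
  -- prefix loop
  have hpref := pvPrefInv (a :: rest) ((a :: rest).length - 1) 1 (by omega) (le_refl 1) (by omega)
  norm_cast at hpref
  rw [hpref]
  -- postfix base
  have hcast1 : ((a :: rest).length : Int) - 1 = ((((a :: rest).length - 1 : Nat)) : Int) := by omega
  rw [hcast1]
  have hpostbase : PySem.List.pySetD (List.replicate (a :: rest).length 0) ((((a :: rest).length - 1 : Nat)) : Int)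
      (PySem.List.pyGetD (a :: rest) ((((a :: rest).length - 1 : Nat)) : Int) 0)
      = List.replicate ((a :: rest).length - 1) 0 ++ (pvSuf (a :: rest)).drop ((a :: rest).length - 1) := by
    rw [PySem.List.pySetD_natCast, PySem.List.pyGetD_natCast]
    obtain ⟨k, hk⟩ : ∃ k, (a :: rest).length = k + 1 := ⟨rest.length, by simp⟩
    rw [hk]
    simp only [Nat.add_sub_cancel]
    rw [pvSetReplicate]
    rw [pvDropLastOne (pvSuf (a :: rest)) k (by rw [hlenS, hk])]
    rw [pvSuf_getD]
    rw [pvDropLastOne (a :: rest) k hk]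
    simp
  rw [hpostbase]
  -- postfix loop
  have hpost := pvPostInv (a :: rest) ((a :: rest).length - 1) (by omega)
  rw [show ((((a :: rest).length - 1 : Nat)) : Int) - 1 = ((a :: rest).length : Int) - 2 from by omega] at hpost
  rw [hpost]
  -- final loop
  rw [PySem.List.pyRange_one_cons (by exact_mod_cast Nat.succ_pos rest.length : (0:Int) < ((a :: rest).length : Int))]
  simp only [List.foldl_cons, zero_add]
  rw [pvOptFold]
  simp only [Option.getD_some]
  have hpz := pvIdxZip (pvCum 0 (a :: rest)) (pvSuf (a :: rest)) (a :: rest).length hlenC hlenS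
      ((a :: rest).length - 1) 1 (by omega) (by omega)
  norm_cast at hpz
  rw [hpz]
  -- B side: the prefs list (its foldl was already unfolded one step by the simp above)
  rw [(by decide : PySem.List.pyGetD [(0 : Int)] (-1) 0 = (0 : Int))]
  rw [pvBuild rest [(0 : Int)] (0 + a)]
  rw [show ([(0 : Int)] ++ [0 + a]) ++ pvCum (0 + a) rest = [(0 : Int)] ++ pvCum 0 (a :: rest) from by
    simp [pvCum]]
  have htot : PySem.List.pyGetD ([(0 : Int)] ++ pvCum 0 (a :: rest)) (-1) 0 = 0 + (a :: rest).sum := by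
    rw [PySem.List.pyGetD_neg_one _ _ (by simp)]
    exact pvGetLast (a :: rest) 0 (by simp)
  rw [htot, PySem.List.slice_from_one, PySem.List.slice_to_neg_one]
  have hCc : pvCum 0 (a :: rest) = a :: pvCum a rest := by simp [pvCum]
  have htail : ([(0 : Int)] ++ pvCum 0 (a :: rest)).tail = a :: pvCum a rest := by
    simp [hCc]
  have hdropl : ([(0 : Int)] ++ pvCum 0 (a :: rest)).dropLast = 0 :: (pvCum 0 (a :: rest)).dropLast := by
    have : pvCum 0 (a :: rest) ≠ [] := by rw [hCc]; simp
    cases hc : pvCum 0 (a :: rest) with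
    | nil => exact absurd hc this
    | cons y t => simp
  rw [htail, hdropl, PySem.List.max?_id_cons, PySem.List.min?_id_cons]
  simp only [Option.getD_some]
  -- A side is max over C and S; rewrite S's max via the prefix identity
  have hSc : pvSuf (a :: rest) = (a + (pvSuf rest).headD 0) :: pvSuf rest := rfl
  rw [hCc, hSc]
  simp only [PySem.List.pyGetD_zero_cons, List.zip_cons_cons, List.drop_succ_cons, List.drop_zero]
  rw [pvFoldlZipMax _ _ _ _ (by rw [pvCum_length, pvSuf_length])]
  congr 1
  -- (pvSuf rest).foldl max (a + headD) = total - min of the leading prefixes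
  have hmap := pvSufMap (a :: rest) hne
  rw [hSc] at hmap
  have hh : a + (pvSuf rest).headD 0 = (a :: rest).sum - 0 := (List.cons.injEq _ _ _ _ ▸ hmap).1
  have ht : pvSuf rest = (pvCum 0 (a :: rest)).dropLast.map (fun p => (a :: rest).sum - p) :=
    (List.cons.injEq _ _ _ _ ▸ hmap).2
  rw [hh, ht, pvMaxMap]
  rw [hCc]
  ring

-- ===== VERDICT (by name: the statement is the Claim_ definition above) =====
theorem max_aggregate_temperature_change_spec : Claim_equal_max_aggregate_temperature_change := by
  intro arr _ hpre
  unfold Spec_max_aggregate_temperature_change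
  cases arr with
  | nil => exact absurd rfl hpre
  | cons a rest => exact pvMain a rest
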